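-- pv_equiv track=rewrite | github.com/matiaslopez/pygame-corsi | corsi/research/mayoresDiferencias.py | cantLetras
-- ===== SOURCE A (Python) =====
-- def cantLetras(seq1,seq2):
--     letters = ['A', 'B', 'C', 'D', 'E', 'F', 'G', 'H', 'I']
--     cantLetras = 0
--     for letter in letters:
--         apariciones = (str(seq1+seq2)).count(letter)
--         #Si la letra aparece alguna vez, incremento
--         if apariciones > 0:
--             cantLetras+=1
--
--     return cantLetras
-- ===== SOURCE B (Python) =====
-- def cantLetras(seq1, seq2):
--     # Single pass over the data: mark each letter A-I seen in a 9-slot table, then sum it,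
--     # instead of nine separate full .count() scans of the string.
--     seen = [False] * 9
--     for c in str(seq1 + seq2):
--         i = ord(c) - ord('A')
--         if 0 <= i < 9:
--             seen[i] = True
--     return sum(seen)
-- ===== Notes on version B (the rewrite author's own statement) =====
-- stated objective: alternative
-- what changed: B makes a single pass over the data (str(seq1+seq2)), marking each seen letter in a 9-slot boolean table indexed by ord(c)-ord('A') and summing the table, instead of A's nine separate full .count() scans, one per letter.
import Mathlib
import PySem

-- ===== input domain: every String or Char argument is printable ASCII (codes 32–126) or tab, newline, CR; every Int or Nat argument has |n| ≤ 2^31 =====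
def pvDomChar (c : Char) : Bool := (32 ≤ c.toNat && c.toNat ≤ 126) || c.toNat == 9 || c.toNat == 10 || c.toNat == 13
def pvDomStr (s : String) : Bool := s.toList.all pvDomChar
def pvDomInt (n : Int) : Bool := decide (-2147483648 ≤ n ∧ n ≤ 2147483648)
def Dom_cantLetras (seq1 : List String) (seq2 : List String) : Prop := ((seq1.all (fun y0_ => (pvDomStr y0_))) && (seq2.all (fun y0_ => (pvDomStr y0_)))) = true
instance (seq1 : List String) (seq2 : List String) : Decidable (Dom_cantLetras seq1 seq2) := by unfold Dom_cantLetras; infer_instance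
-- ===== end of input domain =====

-- B replaces A's nine per-letter full scans of str(seq1+seq2) by ONE pass over that string,
-- marking each seen letter in a 9-slot boolean table and summing it.

-- Shared helper: Python's str() of a list of strings, i.e. repr.  Exact on the Dom's
-- character set (printable ASCII plus tab/newline/CR): repr escapes backslash, the chosen
-- quote, and \t \n \r; every other Dom character is emitted verbatim.
def pyReprCharEsc (q : Char) (c : Char) : List Char :=
  if c = '\\' then ['\\', '\\']
  else if c = q then ['\\', q]
  else if c = Char.ofNat 9 then ['\\', 't']
  else if c = Char.ofNat 10 then ['\\', 'n']
  else if c = Char.ofNat 13 then ['\\', 'r']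
  else [c]

-- repr of one string: quote with ' unless the string contains ' and no ", then use ".
def pyReprStrChars (cs : List Char) : List Char :=
  let q : Char := if '\'' ∈ cs ∧ ¬ '"' ∈ cs then '"' else '\''
  q :: cs.flatMap (pyReprCharEsc q) ++ [q]

-- str(list) = '[' + ', '.join(repr(x) for x in list) + ']'
def pyReprStrList (xs : List String) : List Char :=
  '[' :: PySem.Chars.join [',', ' '] (xs.map (fun s => pyReprStrChars s.toList)) ++ [']']

-- ===== PORT A =====
def cantLetras (seq1 : List String) (seq2 : List String) : Int :=
  let letters : List Char := ['A', 'B', 'C', 'D', 'E', 'F', 'G', 'H', 'I']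
  letters.foldl (fun acc letter =>
    let apariciones := PySem.Chars.count (pyReprStrList (seq1 ++ seq2)) [letter]
    if apariciones > 0 then acc + 1 else acc) 0

-- ===== PORT B =====
-- one loop step of Source B: mark seen[ord(c)-ord('A')] when 0 ≤ that index < 9
def markSeen (seen : List Bool) (c : Char) : List Bool :=
  if 0 ≤ (c.toNat : Int) - 65 ∧ (c.toNat : Int) - 65 < 9 then
    seen.set ((c.toNat : Int) - 65).toNat true
  else seen

def cantLetras_alt (seq1 : List String) (seq2 : List String) : Int :=
  let seen := (pyReprStrList (seq1 ++ seq2)).foldl markSeen (List.replicate 9 false)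
  -- sum(seen) over booleans = number of True entries
  ((seen.count true : Nat) : Int)

-- ===== PRECONDITION & SPEC =====
def Spec_cantLetras (seq1 : List String) (seq2 : List String) (out : Int) : Prop := out = cantLetras_alt seq1 seq2
instance (seq1 : List String) (seq2 : List String) (out : Int) : Decidable (Spec_cantLetras seq1 seq2 out) := by unfold Spec_cantLetras; infer_instance

-- ===== CLAIM (what is proved, stated in full; the proofs are below) =====
def Claim_equal_cantLetras : Prop := ∀ (seq1 : List String) (seq2 : List String), Dom_cantLetras seq1 seq2 → Spec_cantLetras seq1 seq2 (cantLetras seq1 seq2)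

-- ===== LEMMAS AND PROOFS =====

-- Python's s.count(c) for a single character c is the plain character count.
lemma count_go_single (c : Char) :
    ∀ (fuel : Nat) (cs : List Char) (acc : Nat), cs.length ≤ fuel →
      PySem.Chars.count.go [c] fuel cs acc = acc + cs.count c := by
  intro fuel
  induction fuel with
  | zero =>
    intro cs acc h
    cases cs with
    | nil => simp [PySem.Chars.count.go]
    | cons x t => simp at h
  | succ n ih =>
    intro cs acc h
    cases cs with
    | nil => simp [PySem.Chars.count.go]
    | cons x t =>
      simp only [PySem.Chars.count.go]
      by_cases hx : x = c
      · subst hx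
        simp only [List.isPrefixOf, BEq.rfl, Bool.true_and, if_pos, List.length_singleton,
          List.drop_succ_cons, List.drop_zero]
        rw [ih t (acc + 1) (by simpa using Nat.lt_succ_iff.mp (Nat.lt_of_lt_of_le (by simp) h))]
        simp
        omega
      · have : ([c].isPrefixOf (x :: t)) = false := by
          simp [List.isPrefixOf]
          exact fun hxc => absurd hxc.symm hx
        rw [this]
        simp only [Bool.false_eq_true, if_false]
        rw [ih t acc (by simpa using Nat.lt_succ_iff.mp (Nat.lt_of_lt_of_le (by simp) h))]
        simp [hx]

lemma count_single_pos_iff (cs : List Char) (c : Char) :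
    0 < PySem.Chars.count cs [c] ↔ c ∈ cs := by
  unfold PySem.Chars.count
  simp only [List.isEmpty_iff, reduceCtorEq, if_false]
  rw [count_go_single c cs.length cs 0 le_rfl]
  simp [List.count_pos_iff]

lemma markSeen_length (seen : List Bool) (c : Char) : (markSeen seen c).length = seen.length := by
  unfold markSeen; split <;> simp

-- characterization of B's fold: entry i ends up true iff it started true or letter 65+i occurs
lemma fold_seen (cs : List Char) : ∀ (seen : List Bool), seen.length = 9 →
    cs.foldl markSeen seen =
      (List.range 9).map (fun i => seen[i]?.getD false || decide (Char.ofNat (65 + i) ∈ cs)) := by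
  induction cs with
  | nil =>
    intro seen hlen
    simp only [List.foldl_nil, List.not_mem_nil, decide_false, Bool.or_false]
    apply List.ext_getElem
    · simp [hlen]
    · intro i h1 h2
      simp only [List.getElem_map, List.getElem_range]
      rw [List.getElem?_eq_getElem (by omega)]
      rfl
  | cons c cs ih =>
    intro seen hlen
    rw [List.foldl_cons, ih (markSeen seen c) (by rw [markSeen_length, hlen])]
    apply List.map_congr_left
    intro i hi
    simp only [List.mem_range] at hi
    have hvalid : (65 + i).isValidChar := Or.inl (by omega)
    have htoNat : (Char.ofNat (65 + i)).toNat = 65 + i := by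
      rw [Char.toNat_ofNat, if_pos hvalid]
    unfold markSeen
    by_cases hc : 0 ≤ (c.toNat : Int) - 65 ∧ (c.toNat : Int) - 65 < 9
    · rw [if_pos hc]
      have hct : 65 ≤ c.toNat ∧ c.toNat < 74 := by omega
      have hj : ((c.toNat : Int) - 65).toNat = c.toNat - 65 := by omega
      rw [hj, List.getElem?_set]
      by_cases hij : c.toNat - 65 = i
      · have hceq : Char.ofNat (65 + i) = c := by
          have h1 : c.toNat = 65 + i := by omega
          have h2 : (Char.ofNat (65 + i)).toNat = c.toNat := by rw [htoNat, h1]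
          exact Char.ext (UInt32.toNat_inj.mp h2)
        rw [if_pos hij]
        simp [hlen, hceq, show c.toNat - 65 < 9 by omega]
      · rw [if_neg hij]
        have hne : Char.ofNat (65 + i) ≠ c := by
          intro h
          have := congrArg Char.toNat h
          rw [htoNat] at this; omega
        simp [List.mem_cons, hne]
    · rw [if_neg hc]
      have hne : Char.ofNat (65 + i) ≠ c := by
        intro h
        have := congrArg Char.toNat h
        rw [htoNat] at this; omega
      simp [List.mem_cons, hne]

-- ===== VERDICT (by name: the statement is the Claim_ definition above) =====
theorem cantLetras_spec : Claim_equal_cantLetras := by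
  intro seq1 seq2 _
  unfold Spec_cantLetras cantLetras cantLetras_alt
  simp only []
  set cs := pyReprStrList (seq1 ++ seq2) with hcs
  rw [PySem.List.foldl_ite_add_one
      (fun letter => PySem.Chars.count cs [letter] > 0)]
  rw [zero_add, fold_seen cs (List.replicate 9 false) (by simp)]
  congr 1
  have hrep : ∀ i : Nat, ((List.replicate 9 (false : Bool))[i]?.getD false) = false := by
    intro i; rcases h : (List.replicate 9 (false : Bool))[i]? with _ | b
    · rfl
    · have := List.getElem?_replicate.symm.trans h
      split at this
      · cases this; rfl
      · cases this
  simp only [hrep, Bool.false_or, List.count_eq_countP, List.countP_map]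
  have hcomp : ((fun x => x == true) ∘ fun i => decide (Char.ofNat (65 + i) ∈ cs)) =
      fun i => decide (Char.ofNat (65 + i) ∈ cs) := by funext i; simp
  have hmem : ∀ L : Char, decide (PySem.Chars.count cs [L] > 0) = decide (L ∈ cs) :=
    fun L => decide_eq_decide.mpr (count_single_pos_iff cs L)
  rw [hcomp, show List.range 9 = [0,1,2,3,4,5,6,7,8] from rfl]
  have h0 : Char.ofNat (65 + 0) = 'A' := by decide
  have h1 : Char.ofNat (65 + 1) = 'B' := by decide
  have h2 : Char.ofNat (65 + 2) = 'C' := by decide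
  have h3 : Char.ofNat (65 + 3) = 'D' := by decide
  have h4 : Char.ofNat (65 + 4) = 'E' := by decide
  have h5 : Char.ofNat (65 + 5) = 'F' := by decide
  have h6 : Char.ofNat (65 + 6) = 'G' := by decide
  have h7 : Char.ofNat (65 + 7) = 'H' := by decide
  have h8 : Char.ofNat (65 + 8) = 'I' := by decide
  simp only [List.countP_cons, List.countP_nil, hmem, h0, h1, h2, h3, h4, h5, h6, h7, h8]
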